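-- pv_equiv track=rewrite | github.com/C7-2know/computer-science | 1264-maximum-number-of-words-you-can-type/1264-maximum-number-of-words-you-can-type.py | canBeTypedWords
-- ===== SOURCE A (Python) =====
-- def canBeTypedWords(text: str, brokenLetters: str) -> int:
--     broken={l for l in brokenLetters}
--     words=text.split()
--     count = 0
--     for word in words:
--         for l in word:
--             if l in broken:
--                 break
--         else:
--             count += 1
--     return count
-- ===== SOURCE B (Python) =====
-- def canBeTypedWords(text: str, brokenLetters: str) -> int:
--     # single pass over the characters: no split(), no per-word inner scan
--     broken = set(brokenLetters)
--     count = 0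
--     in_word = False
--     clean = True
--     for ch in text:
--         if ch.isspace():
--             if in_word and clean:
--                 count += 1
--             in_word = False
--             clean = True
--         else:
--             in_word = True
--             if ch in broken:
--                 clean = False
--     if in_word and clean:
--         count += 1
--     return count
-- ===== Notes on version B (the rewrite author's own statement) =====
-- stated objective: alternative
-- what changed: B replaces split()-then-scan-each-word with a single character-level pass maintaining in_word/clean state variables, never materialising the word list.
import Mathlib
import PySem

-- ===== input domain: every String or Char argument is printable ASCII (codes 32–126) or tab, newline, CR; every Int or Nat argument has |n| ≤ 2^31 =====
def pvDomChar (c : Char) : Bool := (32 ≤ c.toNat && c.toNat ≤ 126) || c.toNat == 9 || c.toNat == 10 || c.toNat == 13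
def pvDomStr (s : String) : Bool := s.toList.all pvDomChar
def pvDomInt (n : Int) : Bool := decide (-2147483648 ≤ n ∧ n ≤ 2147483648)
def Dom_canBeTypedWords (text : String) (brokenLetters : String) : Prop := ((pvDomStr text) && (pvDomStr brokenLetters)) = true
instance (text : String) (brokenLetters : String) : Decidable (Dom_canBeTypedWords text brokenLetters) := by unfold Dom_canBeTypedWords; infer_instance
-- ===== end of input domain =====

-- B is an alternative algorithm of the same cost: a single character-level pass with
-- in_word/clean state instead of split() plus a per-word inner scan with break/else.

-- ===== PORT A =====
-- inner 'for l in word: if l in broken: break / else: count += 1' — true iff no broken letter hit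
def pvWordOk (broken : PySem.Set Char) : List Char → Bool
  | [] => true
  | l :: rest => if PySem.Set.contains broken l then false else pvWordOk broken rest

def canBeTypedWords (text : String) (brokenLetters : String) : Int :=
  let broken : PySem.Set Char := PySem.Set.ofList brokenLetters.toList
  let words := PySem.Str.split₀ text
  words.foldl (fun count word => if pvWordOk broken word.toList then count + 1 else count) 0

-- ===== PORT B =====
def canBeTypedWords_alt (text : String) (brokenLetters : String) : Int :=
  let broken : PySem.Set Char := PySem.Set.ofList brokenLetters.toList
  let st := text.toList.foldl
    (fun (s : Int × Bool × Bool) ch =>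
      if PySem.Chars.isspace ch then
        (if s.2.1 && s.2.2 then s.1 + 1 else s.1, false, true)
      else
        (s.1, true, s.2.2 && !(PySem.Set.contains broken ch)))
    (0, false, true)
  if st.2.1 && st.2.2 then st.1 + 1 else st.1

-- ===== PRECONDITION & SPEC =====
def Spec_canBeTypedWords (text : String) (brokenLetters : String) (out : Int) : Prop := out = canBeTypedWords_alt text brokenLetters
instance (text : String) (brokenLetters : String) (out : Int) : Decidable (Spec_canBeTypedWords text brokenLetters out) := by unfold Spec_canBeTypedWords; infer_instance

-- ===== CLAIM (what is proved, stated in full; the proofs are below) =====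
def Claim_equal_canBeTypedWords : Prop := ∀ (text : String) (brokenLetters : String), Dom_canBeTypedWords text brokenLetters → Spec_canBeTypedWords text brokenLetters (canBeTypedWords text brokenLetters)

-- ===== LEMMAS AND PROOFS =====

-- pvWordOk is 'no broken letter in the word'
theorem pvWordOk_eq_all (broken : PySem.Set Char) (w : List Char) :
    pvWordOk broken w = w.all (fun c => !(PySem.Set.contains broken c)) := by
  induction w with
  | nil => rfl
  | cons c rest ih =>
    simp only [pvWordOk, List.all_cons, ih]
    cases PySem.Set.contains broken c
    · simp
    · simp

-- A's counting fold, abstracted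
def pvCntA (broken : PySem.Set Char) (init : Int) (ws : List (List Char)) : Int :=
  ws.foldl (fun count word => if word.all (fun c => !(PySem.Set.contains broken c)) then count + 1 else count) init

theorem pvCntA_shift (broken : PySem.Set Char) (init : Int) (ws : List (List Char)) :
    pvCntA broken init ws = init + pvCntA broken 0 ws := by
  induction ws generalizing init with
  | nil => simp [pvCntA]
  | cons w rest ih =>
    simp only [pvCntA, List.foldl_cons] at *
    split
    · rw [ih (init + 1), ih ((0 : Int) + 1)]; ring
    · exact ih init

theorem pvCntA_append (broken : PySem.Set Char) (xs ys : List (List Char)) :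
    pvCntA broken 0 (xs ++ ys) = pvCntA broken 0 xs + pvCntA broken 0 ys := by
  unfold pvCntA
  rw [List.foldl_append]
  exact pvCntA_shift broken _ ys

-- defining equations of split₀.go, checked by rfl
theorem pvGo_nil (cur : List Char) (acc : List (List Char)) :
    PySem.Chars.split₀.go [] cur acc
      = if cur.isEmpty then acc.reverse else (cur.reverse :: acc).reverse := rfl

theorem pvGo_cons (c : Char) (rest cur : List Char) (acc : List (List Char)) :
    PySem.Chars.split₀.go (c :: rest) cur acc
      = if PySem.Chars.isspace c then
          (if cur.isEmpty then PySem.Chars.split₀.go rest [] acc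
           else PySem.Chars.split₀.go rest [] (cur.reverse :: acc))
        else PySem.Chars.split₀.go rest (c :: cur) acc := rfl

-- accumulator lemma for split₀.go
theorem split₀_go_acc (cs cur : List Char) (acc : List (List Char)) :
    PySem.Chars.split₀.go cs cur acc = acc.reverse ++ PySem.Chars.split₀.go cs cur [] := by
  induction cs generalizing cur acc with
  | nil =>
    rw [pvGo_nil, pvGo_nil]
    by_cases h : cur.isEmpty = true <;> simp [h]
  | cons c rest ih =>
    rw [pvGo_cons, pvGo_cons]
    by_cases hs : PySem.Chars.isspace c = true
    · by_cases he : cur.isEmpty = true <;>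
        simp [hs, he, ih [] acc, ih [] (cur.reverse :: acc), ih [] [cur.reverse]]
    · simp [hs, ih (c :: cur) acc]

-- B's loop body, named
def pvStepB (broken : PySem.Set Char) (s : Int × Bool × Bool) (ch : Char) : Int × Bool × Bool :=
  if PySem.Chars.isspace ch then
    (if s.2.1 && s.2.2 then s.1 + 1 else s.1, false, true)
  else
    (s.1, true, s.2.2 && !(PySem.Set.contains broken ch))

def pvFinishB (s : Int × Bool × Bool) : Int := if s.2.1 && s.2.2 then s.1 + 1 else s.1

-- MAIN INVARIANT: B's machine run from a state describing the (reversed) current word cur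
-- computes count plus A's count of the words split₀.go still produces.
theorem pvMain (broken : PySem.Set Char) (cs cur : List Char) (count : Int) :
    pvFinishB (cs.foldl (pvStepB broken)
        (count, !cur.isEmpty, cur.all (fun c => !(PySem.Set.contains broken c))))
      = count + pvCntA broken 0 (PySem.Chars.split₀.go cs cur []) := by
  induction cs generalizing cur count with
  | nil =>
    rw [pvGo_nil]
    simp only [List.foldl_nil, pvFinishB]
    by_cases he : cur.isEmpty = true
    · simp [he, pvCntA]
    · simp only [he, Bool.not_false, Bool.true_and, Bool.false_eq_true, if_false, pvCntA,
        List.reverse_cons, List.reverse_nil, List.nil_append, List.foldl_cons, List.foldl_nil,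
        List.all_reverse]
      by_cases hok : cur.all (fun c => !(PySem.Set.contains broken c)) = true
      · rw [if_pos hok, if_pos hok]; ring
      · rw [if_neg hok, if_neg hok]; ring
  | cons c rest ih =>
    rw [pvGo_cons]
    simp only [List.foldl_cons, pvStepB]
    by_cases hs : PySem.Chars.isspace c = true
    · rw [if_pos hs, if_pos hs]
      by_cases he : cur.isEmpty = true
      · have hih := ih ([] : List Char) count
        simp only [List.isEmpty_nil, Bool.not_true, List.all_nil] at hih
        have hc : (!cur.isEmpty && cur.all (fun c => !(PySem.Set.contains broken c))) = false := by
          simp [he]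
        simpa [he, hc] using hih
      · have he' : cur.isEmpty = false := by revert he; cases cur.isEmpty <;> simp
        rw [if_neg he, split₀_go_acc rest [] [cur.reverse], pvCntA_append]
        have hih := ih ([] : List Char)
          (if (!cur.isEmpty && cur.all (fun c => !(PySem.Set.contains broken c))) then count + 1 else count)
        simp only [List.isEmpty_nil, Bool.not_true, List.all_nil] at hih
        rw [hih]
        simp only [he', Bool.not_false, Bool.true_and, pvCntA, List.reverse_cons,
          List.reverse_nil, List.nil_append, List.foldl_cons, List.foldl_nil, List.all_reverse]
        by_cases hok : cur.all (fun c => !(PySem.Set.contains broken c)) = true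
        · rw [if_pos hok, if_pos hok]; ring
        · rw [if_neg hok, if_neg hok]; ring
    · rw [if_neg hs, if_neg hs]
      have hih := ih (c :: cur) count
      simp only [List.isEmpty_cons, List.all_cons] at hih
      rw [← hih]
      rw [Bool.and_comm]
      rfl

-- ===== VERDICT (by name: the statement is the Claim_ definition above) =====
theorem canBeTypedWords_spec : Claim_equal_canBeTypedWords := by
  intro text brokenLetters _
  show canBeTypedWords text brokenLetters = canBeTypedWords_alt text brokenLetters
  have h := pvMain (PySem.Set.ofList brokenLetters.toList) text.toList [] 0
  simp only [List.isEmpty_nil, Bool.not_true, List.all_nil, zero_add] at h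
  have hB : canBeTypedWords_alt text brokenLetters
      = pvFinishB (text.toList.foldl (pvStepB (PySem.Set.ofList brokenLetters.toList)) (0, false, true)) := rfl
  have hA : canBeTypedWords text brokenLetters
      = pvCntA (PySem.Set.ofList brokenLetters.toList) 0 (PySem.Chars.split₀ text.toList) := by
    unfold canBeTypedWords
    simp only [PySem.Str.split₀, List.foldl_map]
    simp [pvCntA, pvWordOk_eq_all]
  have hgo : PySem.Chars.split₀ text.toList = PySem.Chars.split₀.go text.toList [] [] := rfl
  rw [hA, hB, hgo, ← h]
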